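-- pv_equiv track=rewrite | github.com/wolfgangmuender/AdventOfCode | 2015/aoc2015_16.py | check
-- ===== SOURCE A (Python) =====
-- INFO = {"children": 3, "cats": 7, "samoyeds": 2, "pomeranians": 3, "akitas": 0, "vizslas": 0, "goldfish": 5, "trees": 3, "cars": 2, "perfumes": 1}
--
-- def check(aunt, is_real):
--     for prop, value in aunt.items():
--         if is_real:
--             if prop in ["cats", "trees"]:
--                 if value <= INFO[prop]:
--                     return False
--             elif prop in ["pomeranians", "goldfish"]:
--                 if value >= INFO[prop]:
--                     return False
--             else:
--                 if value != INFO[prop]: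
--                     return False
--         else:
--             if value != INFO[prop]:
--                 return False
--     return True
-- ===== SOURCE B (Python) =====
-- INFO = {"children": 3, "cats": 7, "samoyeds": 2, "pomeranians": 3, "akitas": 0, "vizslas": 0, "goldfish": 5, "trees": 3, "cars": 2, "perfumes": 1}
--
-- # required sign of (aunt value - clue value) when the MFCSAM reading is a range (is_real)
-- SIGN = {"cats": 1, "trees": 1, "pomeranians": -1, "goldfish": -1}
--
-- def check(aunt, is_real):
--     # Walk the CLUES instead of the aunt: every clue property the aunt reports must
--     # have sign(value - target) equal to the required comparison sign (0 = exact match).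
--     for prop, target in INFO.items():
--         if prop in aunt:
--             d = aunt[prop] - target
--             if (d > 0) - (d < 0) != (SIGN.get(prop, 0) if is_real else 0):
--                 return False
--     # an aunt reporting a property the MFCSAM does not measure cannot match
--     return all(p in INFO for p in aunt)
-- ===== Notes on version B (the rewrite author's own statement) =====
-- stated objective: alternative
-- what changed: B reverses the traversal: instead of walking the aunt's properties through an if/elif branch chain, it walks the fixed clue table INFO, tests each clue the aunt reports via an arithmetic sign comparison sign(value-target) == required sign from a SIGN table, and finishes with a separate membership pass rejecting properties the clue table lacks.
import Mathlib
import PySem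

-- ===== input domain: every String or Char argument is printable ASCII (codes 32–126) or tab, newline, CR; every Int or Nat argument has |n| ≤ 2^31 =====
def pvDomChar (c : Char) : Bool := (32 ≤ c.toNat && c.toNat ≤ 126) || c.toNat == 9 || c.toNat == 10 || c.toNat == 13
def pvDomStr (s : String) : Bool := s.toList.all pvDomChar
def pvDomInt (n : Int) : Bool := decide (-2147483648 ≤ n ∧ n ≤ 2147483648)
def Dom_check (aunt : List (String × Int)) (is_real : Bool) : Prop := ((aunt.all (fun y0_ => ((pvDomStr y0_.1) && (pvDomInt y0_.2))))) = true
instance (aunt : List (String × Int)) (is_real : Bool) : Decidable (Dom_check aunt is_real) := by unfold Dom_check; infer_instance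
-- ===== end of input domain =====

-- B walks the clue table INFO with a sign-comparison instead of walking the aunt with branch chains; same return value on Pre_.

-- ===== PORT A =====
def INFO : PySem.Dict String Int := PySem.Dict.mk
  [("children", 3), ("cats", 7), ("samoyeds", 2), ("pomeranians", 3), ("akitas", 0),
   ("vizslas", 0), ("goldfish", 5), ("trees", 3), ("cars", 2), ("perfumes", 1)]

-- the for-loop of A, one pair at a time (INFO[prop] raises KeyError on unknown props, excluded by Pre_check; getD 0 stands for the lookup)
def checkLoop (is_real : Bool) : List (String × Int) → Bool
  | [] => true
  | (prop, value) :: rest =>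
    if is_real then
      if prop ∈ ["cats", "trees"] then
        if value ≤ INFO.getD prop 0 then false else checkLoop is_real rest
      else if prop ∈ ["pomeranians", "goldfish"] then
        if value ≥ INFO.getD prop 0 then false else checkLoop is_real rest
      else
        if value ≠ INFO.getD prop 0 then false else checkLoop is_real rest
    else
      if value ≠ INFO.getD prop 0 then false else checkLoop is_real rest

def check (aunt : List (String × Int)) (is_real : Bool) : Bool := checkLoop is_real aunt

-- ===== PORT B =====
-- SIGN: the required sign of (value - target) when is_real
def pvSIGN : PySem.Dict String Int := PySem.Dict.mk
  [("cats", 1), ("trees", 1), ("pomeranians", -1), ("goldfish", -1)]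

-- (d > 0) - (d < 0)
def pySign (d : Int) : Int := (if 0 < d then (1 : Int) else 0) - (if d < 0 then 1 else 0)

-- the for-loop over INFO.items; 'prop in aunt' + 'aunt[prop]' ported as one get? match
def bLoop (aunt : List (String × Int)) (is_real : Bool) : List (String × Int) → Bool
  | [] => aunt.all (fun pv => INFO.contains pv.1)
  | (prop, target) :: rest =>
    match (PySem.Dict.mk aunt).get? prop with
    | some v =>
        if pySign (v - target) ≠ (if is_real then pvSIGN.getD prop 0 else 0) then false
        else bLoop aunt is_real rest
    | none => bLoop aunt is_real rest

def check_alt (aunt : List (String × Int)) (is_real : Bool) : Bool :=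
  bLoop aunt is_real INFO.items

-- ===== PRECONDITION & SPEC =====
-- helpers for Pre_check only (independent of both ports)
def pvKnownProps : List String :=
  ["children", "cats", "samoyeds", "pomeranians", "akitas",
   "vizslas", "goldfish", "trees", "cars", "perfumes"]

def pvInfoList : List (String × Int) :=
  [("children", 3), ("cats", 7), ("samoyeds", 2), ("pomeranians", 3), ("akitas", 0),
   ("vizslas", 0), ("goldfish", 5), ("trees", 3), ("cars", 2), ("perfumes", 1)]

def pvPass (is_real : Bool) (pv : String × Int) : Bool :=
  let e := ((pvInfoList.find? (·.1 == pv.1)).map (·.2)).getD 0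
  if is_real && (pv.1 == "cats" || pv.1 == "trees") then e < pv.2
  else if is_real && (pv.1 == "pomeranians" || pv.1 == "goldfish") then pv.2 < e
  else pv.2 == e

-- Pre_ excludes: (a) lists with duplicate property names, which a Python dict argument cannot
-- represent (the list-level behaviours of the ports there are artefacts of the encoding), and
-- (b) inputs on which an unknown property name is actually reached (not preceded by a failing
-- known property), where Python A raises KeyError.
def Pre_check (aunt : List (String × Int)) (is_real : Bool) : Prop :=
  (aunt.map Prod.fst).Nodup ∧
  ∀ i, (h : i < aunt.length) → aunt[i].1 ∉ pvKnownProps →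
    ∃ j, ∃ _ : j < i, pvPass is_real (aunt[j]'(by omega)) = false
instance (aunt : List (String × Int)) (is_real : Bool) : Decidable (Pre_check aunt is_real) := by unfold Pre_check; infer_instance

def pvWitness_check : (List (String × Int)) × Bool := ([("cats", 8), ("cars", 2)], true)

def Spec_check (aunt : List (String × Int)) (is_real : Bool) (out : Bool) : Prop := out = check_alt aunt is_real
instance (aunt : List (String × Int)) (is_real : Bool) (out : Bool) : Decidable (Spec_check aunt is_real out) := by unfold Spec_check; infer_instance

-- ===== CLAIM (what is proved, stated in full; the proofs are below) =====
def Claim_equal_check : Prop := ∀ (aunt : List (String × Int)) (is_real : Bool), Dom_check aunt is_real → Pre_check aunt is_real → Spec_check aunt is_real (check aunt is_real)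

-- ===== LEMMAS AND PROOFS =====

-- A's per-element branch test, factored out
def stepA (is_real : Bool) (p : String) (v : Int) : Bool :=
  if is_real then
    if p ∈ ["cats", "trees"] then decide (¬ v ≤ INFO.getD p 0)
    else if p ∈ ["pomeranians", "goldfish"] then decide (¬ v ≥ INFO.getD p 0)
    else decide (v = INFO.getD p 0)
  else decide (v = INFO.getD p 0)

lemma checkLoop_cons (is_real : Bool) (p : String) (v : Int) (rest : List (String × Int)) :
    checkLoop is_real ((p, v) :: rest) = (stepA is_real p v && checkLoop is_real rest) := by
  cases is_real <;> simp only [checkLoop, stepA] <;> split_ifs <;> simp_all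

-- one known property: A's branch test agrees with Pre_'s pass predicate
lemma step_pass (p : String) (v : Int) (is_real : Bool) (hp : p ∈ pvKnownProps) :
    stepA is_real p v = pvPass is_real (p, v) := by
  fin_cases hp <;> cases is_real <;>
    simp [stepA, pvPass, pvInfoList, INFO, PySem.Dict.getD, PySem.Dict.get?, List.find?] <;>
    rfl

-- A under Pre_'s reached-unknown condition is a plain conjunction over the aunt
lemma A_eq_all (is_real : Bool) (aunt : List (String × Int))
    (hpre : ∀ i, (h : i < aunt.length) → aunt[i].1 ∉ pvKnownProps →
      ∃ j, ∃ _ : j < i, pvPass is_real (aunt[j]'(by omega)) = false) :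
    checkLoop is_real aunt
      = aunt.all (fun pv => decide (pv.1 ∈ pvKnownProps) && pvPass is_real pv) := by
  induction aunt with
  | nil => simp [checkLoop]
  | cons pv rest ih =>
    obtain ⟨p, v⟩ := pv
    have hk : p ∈ pvKnownProps := by
      by_contra hk
      obtain ⟨j, hj, -⟩ := hpre 0 (by simp) hk
      omega
    simp only [List.all_cons, checkLoop_cons, step_pass p v is_real hk]
    by_cases hpass : pvPass is_real (p, v) = true
    · have hrest : ∀ i, (h : i < rest.length) → rest[i].1 ∉ pvKnownProps →
          ∃ j, ∃ _ : j < i, pvPass is_real (rest[j]'(by omega)) = false := by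
        intro i hi hunk
        obtain ⟨j, hj, hf⟩ := hpre (i + 1) (by simpa using Nat.succ_lt_succ hi) (by simpa using hunk)
        cases j with
        | zero =>
          have : pvPass is_real (p, v) = false := by simpa using hf
          simp [hpass] at this
        | succ j' =>
          exact ⟨j', by omega, by simpa using hf⟩
      simp [ih hrest, hpass, hk]
    · simp [Bool.eq_false_iff.mpr hpass, hk]

-- B's loop over any clue list is a conjunction of per-clue tests plus the final membership pass
lemma bLoop_eq_all (aunt : List (String × Int)) (is_real : Bool) (clues : List (String × Int)) :
    bLoop aunt is_real clues
      = ((clues.all (fun pt =>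
            match (PySem.Dict.mk aunt).get? pt.1 with
            | some v => !decide (pySign (v - pt.2) ≠ (if is_real then pvSIGN.getD pt.1 0 else 0))
            | none => true))
         && aunt.all (fun pv => INFO.contains pv.1)) := by
  induction clues with
  | nil => simp [bLoop]
  | cons pt rest ih =>
    obtain ⟨p, t⟩ := pt
    simp only [bLoop, List.all_cons]
    cases hg : (PySem.Dict.mk aunt).get? p with
    | none => simp [ih]
    | some v =>
      by_cases h : pySign (v - t) ≠ (if is_real then pvSIGN.getD p 0 else 0)
      · simp [h]
      · simp [ih, h]

-- INFO membership is exactly the known-props list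
lemma contains_INFO (p : String) : INFO.contains p = decide (p ∈ pvKnownProps) := by
  rw [Bool.eq_iff_iff]
  simp [INFO, pvKnownProps, PySem.Dict.contains_mk]
  constructor <;> intro h <;> rcases h with h|h|h|h|h|h|h|h|h|h <;> simp [h]

-- per-clue sign test = Pre_'s pass predicate
set_option maxHeartbeats 1000000 in
lemma sign_eq_pass (p : String) (t v : Int) (is_real : Bool) (hp : (p, t) ∈ pvInfoList) :
    (!decide (pySign (v - t) ≠ (if is_real then pvSIGN.getD p 0 else 0)))
      = pvPass is_real (p, v) := by
  simp only [pvInfoList, List.mem_cons, List.not_mem_nil, or_false, Prod.mk.injEq] at hp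
  rcases hp with ⟨rfl,rfl⟩|⟨rfl,rfl⟩|⟨rfl,rfl⟩|⟨rfl,rfl⟩|⟨rfl,rfl⟩|⟨rfl,rfl⟩|⟨rfl,rfl⟩|⟨rfl,rfl⟩|⟨rfl,rfl⟩|⟨rfl,rfl⟩ <;>
    cases is_real <;>
    simp only [pySign, pvPass, pvSIGN, pvInfoList, PySem.Dict.getD, PySem.Dict.get?, List.find?,
      Bool.false_and, Bool.true_and, if_true] <;>
    split_ifs <;> simp_all <;> omega

-- every known prop appears in the clue list
lemma known_mem_items (p : String) (hp : p ∈ pvKnownProps) : ∃ t, (p, t) ∈ pvInfoList := by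
  fin_cases hp
  · exact ⟨3, by decide⟩
  · exact ⟨7, by decide⟩
  · exact ⟨2, by decide⟩
  · exact ⟨3, by decide⟩
  · exact ⟨0, by decide⟩
  · exact ⟨0, by decide⟩
  · exact ⟨5, by decide⟩
  · exact ⟨3, by decide⟩
  · exact ⟨2, by decide⟩
  · exact ⟨1, by decide⟩

lemma B_eq_all (aunt : List (String × Int)) (is_real : Bool)
    (hnd : (aunt.map Prod.fst).Nodup) :
    check_alt aunt is_real
      = aunt.all (fun pv => decide (pv.1 ∈ pvKnownProps) && pvPass is_real pv) := by
  have hkeys : (PySem.Dict.mk aunt).keys.Nodup := by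
    simpa [PySem.Dict.keys, PySem.Dict.items] using hnd
  have hitems : INFO.items = pvInfoList := rfl
  rw [check_alt, bLoop_eq_all, hitems, Bool.eq_iff_iff]
  simp only [Bool.and_eq_true, List.all_eq_true, decide_eq_true_eq]
  constructor
  · rintro ⟨hg, hkb⟩ pv hpv
    have hknown : pv.1 ∈ pvKnownProps := by
      have := hkb pv hpv
      rwa [contains_INFO, decide_eq_true_eq] at this
    refine ⟨by simp [hknown], ?_⟩
    obtain ⟨t, ht⟩ := known_mem_items pv.1 hknown
    have hmem : (pv.1, pv.2) ∈ (PySem.Dict.mk aunt).items := by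
      simpa [PySem.Dict.items] using hpv
    have hget : (PySem.Dict.mk aunt).get? pv.1 = some pv.2 :=
      PySem.Dict.get?_of_mem_items (PySem.Dict.mk aunt) hmem hkeys
    have := hg (pv.1, t) ht
    rw [hget] at this
    rw [← sign_eq_pass pv.1 t pv.2 is_real ht]
    simpa using this
  · intro hf
    refine ⟨?_, ?_⟩
    · rintro ⟨p, t⟩ hpt
      cases hget : (PySem.Dict.mk aunt).get? p with
      | none => simp
      | some v =>
        have hmem : (p, v) ∈ aunt := by
          have h2 := PySem.Dict.mem_items_of_get?_eq_some (PySem.Dict.mk aunt) hget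
          simpa [PySem.Dict.items] using h2
        have := (hf (p, v) hmem).2
        rw [← sign_eq_pass p t v is_real hpt] at this
        simpa using this
    · intro pv hpv
      rw [contains_INFO]
      simpa using (hf pv hpv).1

-- ===== VERDICT (by name: the statement is the Claim_ definition above) =====
theorem check_spec : Claim_equal_check := by
  intro aunt is_real _ hpre
  unfold Spec_check check
  rw [A_eq_all is_real aunt hpre.2, B_eq_all aunt is_real hpre.1]
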